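-- pv_equiv track=rewrite | github.com/drewbrew/advent-of-code-2015 | day21.py | part_two
-- ===== SOURCE A (Python) =====
-- from itertools import permutations
--
-- BOSS_HIT = 104
--
-- BOSS_DAMAGE = 8
--
-- BOSS_ARMOR = 1
--
-- class Fighter:
--     def __init__(self, hit_points: int, damage: int, armor: int) -> None:
--         self.hit_points = hit_points
--         self.damage = damage
--         self.armor = armor
--
--     def receive_attack(self, damage) -> bool:
--         damage_dealt = max([1, damage - self.armor])
--         self.hit_points -= damage_dealt
--         return self.is_alive()
--
--     def is_alive(self) -> bool:
--         return self.hit_points > 0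
--
-- WEAPON_OPTIONS = [
--     (8, 4),  # dagger
--     (10, 5),  # shortsword
--     (25, 6),  # warhammer
--     (40, 7),  # longsword
--     (74, 8),  # great axe
-- ]
--
-- ARMOR_OPTIONS = [
--     (0, 0),  # nothing
--     (13, 1),  # leather
--     (31, 2),  # chain mail
--     (53, 3),  # splint mail
--     (75, 4),  # banded
--     (102, 5),  # plate
-- ]
--
-- RING_OPTIONS = list(
--     permutations(
--         [
--             (0, 0, 0),  # nothing - 1
--             (0, 0, 0),  # nothing - 2
--             (25, 1, 0),  # +1 damage
--             (50, 2, 0),  # +2 dmg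
--             (100, 3, 0),  # +3
--             (20, 0, 1),  # +1 armor
--             (40, 0, 2),  # +2
--             (80, 0, 3),  # +3
--         ],
--         2,
--     )
-- )
--
-- def part_two(your_hit_points: int = 100) -> int:
--     """Part 2: most gold spent while losing"""
--     best_cost = 0
--     for weapon_cost, weapon_damage in WEAPON_OPTIONS:
--         for armor_cost, armor_boost in ARMOR_OPTIONS:
--             for (ring1_cost, ring_1_damage, ring_1_armor), (
--                 ring2_cost,
--                 ring2_damage,
--                 ring2_armor,
--             ) in RING_OPTIONS:
--                 player = Fighter(
--                     hit_points=your_hit_points,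
--                     damage=weapon_damage + ring_1_damage + ring2_damage,
--                     armor=armor_boost + ring_1_armor + ring2_armor,
--                 )
--                 boss = Fighter(
--                     hit_points=BOSS_HIT, damage=BOSS_DAMAGE, armor=BOSS_ARMOR
--                 )
--                 while boss.is_alive():
--                     boss.receive_attack(player.damage)
--                     if not boss.is_alive():
--                         break
--                     player.receive_attack(boss.damage)
--                     if not player.is_alive():
--                         cost = weapon_cost + armor_cost + ring1_cost + ring2_cost
--                         if cost > best_cost:
--                             best_cost = cost
--                         break
--
--     return best_cost
-- ===== SOURCE B (Python) =====
-- from itertools import permutations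
--
-- BOSS_HIT = 104
-- BOSS_DAMAGE = 8
-- BOSS_ARMOR = 1
--
-- WEAPON_OPTIONS = [(8, 4), (10, 5), (25, 6), (40, 7), (74, 8)]
-- ARMOR_OPTIONS = [(0, 0), (13, 1), (31, 2), (53, 3), (75, 4), (102, 5)]
-- RING_OPTIONS = list(
--     permutations(
--         [(0, 0, 0), (0, 0, 0), (25, 1, 0), (50, 2, 0), (100, 3, 0),
--          (20, 0, 1), (40, 0, 2), (80, 0, 3)],
--         2,
--     )
-- )
--
--
-- def ceil_div(a, d):
--     return -(-a // d)
--
--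
-- def part_two(your_hit_points: int = 100) -> int:
--     """Part 2: most gold spent while losing.
--
--     Closed-form combat instead of turn-by-turn simulation: the player loses
--     exactly when it takes the boss strictly fewer rounds to kill the player
--     than the player needs to kill the boss (the player strikes first, so a
--     tie is a player win).
--     """
--     best = 0
--     for wc, wd in WEAPON_OPTIONS:
--         for ac, ab in ARMOR_OPTIONS:
--             for (r1c, r1d, r1a), (r2c, r2d, r2a) in RING_OPTIONS:
--                 boss_dmg = max(1, BOSS_DAMAGE - ab - r1a - r2a)
--                 player_dmg = max(1, wd + r1d + r2d - BOSS_ARMOR)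
--                 if ceil_div(your_hit_points, boss_dmg) < ceil_div(BOSS_HIT, player_dmg):
--                     best = max(best, wc + ac + r1c + r2c)
--     return best
-- ===== Notes on version B (the rewrite author's own statement) =====
-- stated objective: faster
-- what changed: Replaced the Fighter class and the per-loadout turn-by-turn combat simulation with a closed-form winner test (ceil-division round counts, strict '<' because the player strikes first), keeping the three loops over equipment options.
import Mathlib
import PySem

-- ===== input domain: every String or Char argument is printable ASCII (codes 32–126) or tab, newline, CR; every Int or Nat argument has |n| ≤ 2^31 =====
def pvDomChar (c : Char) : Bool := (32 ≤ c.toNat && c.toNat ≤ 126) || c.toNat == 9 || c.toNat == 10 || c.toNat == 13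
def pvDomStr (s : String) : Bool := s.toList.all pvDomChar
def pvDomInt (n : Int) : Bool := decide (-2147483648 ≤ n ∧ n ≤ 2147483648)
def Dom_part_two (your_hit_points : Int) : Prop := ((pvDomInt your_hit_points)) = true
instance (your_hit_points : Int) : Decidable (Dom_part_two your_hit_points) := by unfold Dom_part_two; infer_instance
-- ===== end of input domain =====

-- B replaces A's per-loadout turn-by-turn combat simulation (Fighter class) by a
-- closed-form round-count comparison (ceil division, strict '<' since the player
-- strikes first), keeping the three loops over equipment options; measurably faster.


-- ===== PORT A =====
structure Fighter where
  hit_points : Int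
  damage : Int
  armor : Int
deriving DecidableEq, Repr

def Fighter.receiveAttack (f : Fighter) (damage : Int) : Fighter :=
  { f with hit_points := f.hit_points - max 1 (damage - f.armor) }

def Fighter.isAlive (f : Fighter) : Bool := f.hit_points > 0

def pvWeaponOptions : List (Int × Int) := [(8, 4), (10, 5), (25, 6), (40, 7), (74, 8)]
def pvArmorOptions : List (Int × Int) := [(0, 0), (13, 1), (31, 2), (53, 3), (75, 4), (102, 5)]
def pvRingOptions : List (List (Int × Int × Int)) :=
  PySem.List.permutations
    [(0, 0, 0), (0, 0, 0), (25, 1, 0), (50, 2, 0), (100, 3, 0),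
     (20, 0, 1), (40, 0, 2), (80, 0, 3)] 2

-- A's while-loop: returns the (possibly updated) best cost; pvLoop_decr below justifies termination
theorem pvLoop_decr (boss : Fighter) (pdmg : Int) (h : boss.isAlive = true)
    (h2 : ¬ (boss.receiveAttack pdmg).isAlive = false) :
    (boss.receiveAttack pdmg).hit_points.toNat < boss.hit_points.toNat := by
  simp [Fighter.receiveAttack, Fighter.isAlive] at *
  omega

def pvLoop (best cost : Int) (player boss : Fighter) : Int :=
  if h : boss.isAlive then
    let boss' := boss.receiveAttack player.damage
    if h2 : boss'.isAlive = false then best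
    else
      let player' := player.receiveAttack boss'.damage
      if player'.isAlive = false then (if cost > best then cost else best)
      else pvLoop best cost player' boss'
  else best
termination_by boss.hit_points.toNat
decreasing_by exact pvLoop_decr boss player.damage h h2

def part_two (your_hit_points : Int) : Int :=
  pvWeaponOptions.foldl (fun best wp =>
    pvArmorOptions.foldl (fun best ap =>
      pvRingOptions.foldl (fun best r =>
        match r with
        | [(r1c, r1d, r1a), (r2c, r2d, r2a)] =>
          let player : Fighter := ⟨your_hit_points, wp.2 + r1d + r2d, ap.2 + r1a + r2a⟩
          let boss : Fighter := ⟨104, 8, 1⟩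
          pvLoop best (wp.1 + ap.1 + r1c + r2c) player boss
        | _ => best) best) best) 0

-- ===== PORT B =====
def ceilDiv (a d : Int) : Int := -(PySem.Int.floordiv (-a) d)

def pvWeaponOptionsB : List (Int × Int) := [(8, 4), (10, 5), (25, 6), (40, 7), (74, 8)]
def pvArmorOptionsB : List (Int × Int) := [(0, 0), (13, 1), (31, 2), (53, 3), (75, 4), (102, 5)]
def pvRingOptionsB : List (List (Int × Int × Int)) :=
  PySem.List.permutations
    [(0, 0, 0), (0, 0, 0), (25, 1, 0), (50, 2, 0), (100, 3, 0),
     (20, 0, 1), (40, 0, 2), (80, 0, 3)] 2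

def part_two_alt (your_hit_points : Int) : Int :=
  pvWeaponOptionsB.foldl (fun best wp =>
    pvArmorOptionsB.foldl (fun best ap =>
      pvRingOptionsB.foldl (fun best r =>
        match r with
        | [] => best
        | p :: rest =>
          match rest with
          | [] => best
          | q :: _ =>
            let boss_dmg := max 1 (8 - ap.2 - p.2.2 - q.2.2)
            let player_dmg := max 1 (wp.2 + p.2.1 + q.2.1 - 1)
            if ceilDiv your_hit_points boss_dmg < ceilDiv 104 player_dmg
            then max best (wp.1 + ap.1 + p.1 + q.1) else best) best) best) 0

-- ===== PRECONDITION & SPEC =====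
def Spec_part_two (your_hit_points : Int) (out : Int) : Prop := out = part_two_alt your_hit_points
instance (your_hit_points : Int) (out : Int) : Decidable (Spec_part_two your_hit_points out) := by unfold Spec_part_two; infer_instance

-- ===== CLAIM (what is proved, stated in full; the proofs are below) =====
def Claim_equal_part_two : Prop := ∀ (your_hit_points : Int), Dom_part_two your_hit_points → Spec_part_two your_hit_points (part_two your_hit_points)

-- ===== LEMMAS AND PROOFS =====

theorem ceilDiv_pos (a d : Int) (ha : 1 ≤ a) (hd : 0 < d) : 1 ≤ ceilDiv a d := by
  have h : PySem.Int.floordiv (-a) d < 0 := by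
    rw [PySem.Int.floordiv_lt_iff_lt_mul hd]; omega
  unfold ceilDiv; omega

theorem ceilDiv_nonpos (a d : Int) (ha : a ≤ 0) (hd : 0 < d) : ceilDiv a d ≤ 0 := by
  have h : 0 ≤ PySem.Int.floordiv (-a) d := by
    rw [PySem.Int.le_floordiv_iff_mul_le hd]; omega
  unfold ceilDiv; omega

theorem ceilDiv_eq_one (a d : Int) (ha : 0 < a) (h : a ≤ d) (hd : 0 < d) : ceilDiv a d = 1 := by
  exact (PySem.Int.neg_floordiv_neg_eq_iff_of_pos hd).mpr ⟨by omega, by omega⟩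

theorem ceilDiv_sub (a d : Int) (hd : 0 < d) : ceilDiv (a - d) d = ceilDiv a d - 1 := by
  unfold ceilDiv
  rw [PySem.Int.floordiv_eq_ediv_of_pos hd, PySem.Int.floordiv_eq_ediv_of_pos hd]
  have : -(a - d) = -a + 1 * d := by ring
  rw [this, Int.add_mul_ediv_right _ _ (by omega : d ≠ 0)]
  omega

-- the simulation loop agrees with the round-count comparison (both fighters alive)
theorem loop_eq (best cost pdmg parm bdmg barm : Int) :
    ∀ (n : Nat) (bh ph : Int), bh.toNat ≤ n → 1 ≤ ph → 1 ≤ bh →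
    pvLoop best cost ⟨ph, pdmg, parm⟩ ⟨bh, bdmg, barm⟩ =
      if ceilDiv ph (max 1 (bdmg - parm)) < ceilDiv bh (max 1 (pdmg - barm))
      then (if cost > best then cost else best) else best := by
  intro n
  induction n with
  | zero => intro bh ph hn hp hb; omega
  | succ n ih =>
    intro bh ph hn hp hb
    have hpd : (1:Int) ≤ max 1 (pdmg - barm) := le_max_left _ _
    have hbd : (1:Int) ≤ max 1 (bdmg - parm) := le_max_left _ _
    rw [pvLoop]
    simp only [Fighter.isAlive, Fighter.receiveAttack, decide_eq_true_eq,
      decide_eq_false_iff_not, not_lt, gt_iff_lt]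
    rw [dif_pos (show (0:Int) < bh by omega)]
    by_cases hb2 : bh - max 1 (pdmg - barm) ≤ 0
    · rw [dif_pos hb2]
      have e1 : ceilDiv bh (max 1 (pdmg - barm)) = 1 := ceilDiv_eq_one _ _ (by omega) (by omega) (by omega)
      have e2 : 1 ≤ ceilDiv ph (max 1 (bdmg - parm)) := ceilDiv_pos _ _ hp (by omega)
      rw [e1, if_neg (show ¬ ceilDiv ph (max 1 (bdmg - parm)) < 1 by omega)]
    · rw [dif_neg hb2]
      have e2 : ceilDiv bh (max 1 (pdmg - barm)) =
          ceilDiv (bh - max 1 (pdmg - barm)) (max 1 (pdmg - barm)) + 1 := by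
        rw [ceilDiv_sub _ _ (by omega)]; ring
      by_cases hp2 : ph - max 1 (bdmg - parm) ≤ 0
      · rw [if_pos hp2]
        have e1 : ceilDiv ph (max 1 (bdmg - parm)) = 1 := ceilDiv_eq_one _ _ (by omega) (by omega) (by omega)
        have e3 : 1 ≤ ceilDiv (bh - max 1 (pdmg - barm)) (max 1 (pdmg - barm)) :=
          ceilDiv_pos _ _ (by omega) (by omega)
        rw [e1, if_pos (show 1 < ceilDiv bh (max 1 (pdmg - barm)) by omega)]
      · rw [if_neg hp2]
        rw [ih (bh - max 1 (pdmg - barm)) (ph - max 1 (bdmg - parm)) (by omega) (by omega) (by omega)]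
        have e1 : ceilDiv (ph - max 1 (bdmg - parm)) (max 1 (bdmg - parm)) =
            ceilDiv ph (max 1 (bdmg - parm)) - 1 := ceilDiv_sub _ _ (by omega)
        have e3 : ceilDiv (bh - max 1 (pdmg - barm)) (max 1 (pdmg - barm)) =
            ceilDiv bh (max 1 (pdmg - barm)) - 1 := ceilDiv_sub _ _ (by omega)
        rw [e1, e3]
        simp only [sub_lt_sub_iff_right]

-- a non-positive player hp loses on the boss's first swing, and the round counts agree
theorem loop_eq_nonpos (best cost pdmg parm ph : Int) (hph : ph ≤ 0) (hd : pdmg ≤ 104) :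
    pvLoop best cost ⟨ph, pdmg, parm⟩ ⟨104, 8, 1⟩ =
      if ceilDiv ph (max 1 (8 - parm)) < ceilDiv 104 (max 1 (pdmg - 1))
      then (if cost > best then cost else best) else best := by
  have hpd : (1:Int) ≤ max 1 (pdmg - 1) := le_max_left _ _
  have hpd2 : max 1 (pdmg - 1) ≤ 103 := by omega
  have hbd : (1:Int) ≤ max 1 (8 - parm) := le_max_left _ _
  have c1 : ceilDiv ph (max 1 (8 - parm)) ≤ 0 := ceilDiv_nonpos _ _ hph (by omega)
  have c2 : ceilDiv 104 (max 1 (pdmg - 1)) =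
      ceilDiv (104 - max 1 (pdmg - 1)) (max 1 (pdmg - 1)) + 1 := by
    rw [ceilDiv_sub _ _ (by omega)]; ring
  have c3 : 1 ≤ ceilDiv (104 - max 1 (pdmg - 1)) (max 1 (pdmg - 1)) :=
    ceilDiv_pos _ _ (by omega) (by omega)
  rw [pvLoop]
  simp only [Fighter.isAlive, Fighter.receiveAttack, decide_eq_true_eq,
    decide_eq_false_iff_not, not_lt, gt_iff_lt]
  rw [dif_pos (show (0:Int) < 104 by omega)]
  rw [dif_neg (show ¬ ((104:Int) - max 1 (pdmg - 1) ≤ 0) by omega)]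
  rw [if_pos (show ph - max 1 (8 - parm) ≤ 0 by omega)]
  rw [if_pos (show ceilDiv ph (max 1 (8 - parm)) < ceilDiv 104 (max 1 (pdmg - 1)) by omega)]

theorem loadout_eq (best cost pdmg parm h : Int) (h1 : 1 ≤ pdmg) (h2 : pdmg ≤ 104) :
    pvLoop best cost ⟨h, pdmg, parm⟩ ⟨104, 8, 1⟩ =
      if ceilDiv h (max 1 (8 - parm)) < ceilDiv 104 (max 1 (pdmg - 1))
      then (if cost > best then cost else best) else best := by
  by_cases hh : 1 ≤ h
  · exact loop_eq best cost pdmg parm 8 1 104 104 h (by omega) hh (by omega)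
  · exact loop_eq_nonpos best cost pdmg parm h (by omega) h2

theorem if_gt_eq_max (b c : Int) : (if c > b then c else b) = max b c := by
  by_cases h : c > b
  · rw [if_pos h, max_eq_right h.le]
  · rw [if_neg h, max_eq_left (by omega)]

theorem part_two_spec : Claim_equal_part_two := by
  unfold Claim_equal_part_two
  intro h _
  unfold Spec_part_two part_two part_two_alt
  rw [show pvWeaponOptionsB = pvWeaponOptions from rfl,
      show pvArmorOptionsB = pvArmorOptions from rfl,
      show pvRingOptionsB = pvRingOptions from rfl]
  refine PySem.List.foldl_congr_mem _ _ _ _ ?_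
  intro best wp hw
  refine PySem.List.foldl_congr_mem _ _ _ _ ?_
  intro best2 ap ha
  refine PySem.List.foldl_congr_mem _ _ _ _ ?_
  intro best3 r hr
  have hwd : 4 ≤ wp.2 ∧ wp.2 ≤ 8 := by
    have : ∀ x ∈ pvWeaponOptions, 4 ≤ x.2 ∧ x.2 ≤ 8 := by decide
    exact this wp hw
  have hall : (pvRingOptions.all fun s => match s with
      | [(_, d1, _), (_, d2, _)] => decide (0 ≤ d1 ∧ d1 ≤ 3 ∧ 0 ≤ d2 ∧ d2 ≤ 3)
      | _ => false) = true := by decide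
  have hs := List.all_eq_true.mp hall r hr
  match r with
  | [(r1c, r1d, r1a), (r2c, r2d, r2a)] =>
    simp only [decide_eq_true_eq] at hs
    simp only
    rw [loadout_eq best3 (wp.1 + ap.1 + r1c + r2c) (wp.2 + r1d + r2d) (ap.2 + r1a + r2a) h
      (by omega) (by omega)]
    have e1 : (8:Int) - (ap.2 + r1a + r2a) = 8 - ap.2 - r1a - r2a := by ring
    rw [e1, if_gt_eq_max]
  | [] => simp at hs
  | [_] => simp at hs
  | _ :: _ :: _ :: _ => simp at hs
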